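-- pv_equiv track=rewrite | github.com/DianaLuca/Algorithms | LeetcodePython/SplitingStringsInterviewingIO.py | splstr
-- ===== SOURCE A (Python) =====
-- from collections import defaultdict, Counter
--
-- def splstr(S):
--     d = Counter(S)
--     nr_different = len(d)
--
--     answer = 0
--     pref = set()
--
--     for s in S:
--         pref.add(s)
--         d[s] -= 1
--         if len(pref) == nr_different and d[s] != 0:
--             answer += 1
--         elif not d[s]:
--             return answer
--
--     return answer
-- ===== SOURCE B (Python) =====
-- def splstr(S):
--     if not S:
--         return 0
--     first = {}
--     last = {}
--     for i, c in enumerate(S):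
--         if c not in first:
--             first[c] = i
--         last[c] = i
--     # last first-occurrence index vs first last-occurrence index
--     return max(0, min(last.values()) - max(first.values()))
-- ===== Notes on version B (the rewrite author's own statement) =====
-- stated objective: faster
-- what changed: Replaces A's stateful scan (a mutating Counter, a growing prefix set and a per-step full/last test with early return) by one pass recording each character's first and last occurrence index in two dicts, then returning the closed form max(0, min(last.values()) - max(first.values())).
import Mathlib
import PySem

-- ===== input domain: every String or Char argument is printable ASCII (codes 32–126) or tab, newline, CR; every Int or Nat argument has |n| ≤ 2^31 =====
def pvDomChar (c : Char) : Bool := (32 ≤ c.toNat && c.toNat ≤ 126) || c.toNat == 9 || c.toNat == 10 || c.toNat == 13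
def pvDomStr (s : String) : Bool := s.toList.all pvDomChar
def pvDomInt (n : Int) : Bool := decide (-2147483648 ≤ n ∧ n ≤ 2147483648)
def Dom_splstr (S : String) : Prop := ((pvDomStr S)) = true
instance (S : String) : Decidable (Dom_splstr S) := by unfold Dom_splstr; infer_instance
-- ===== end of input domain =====

-- B replaces A's stateful scan (Counter + growing prefix set + early return) by one pass that
-- records first/last occurrence indices per character, combined arithmetically at the end.

-- ===== PORT A =====
-- the 'for s in S' loop with its mutable state (d, answer, pref) and the early 'return answer';
-- 'pref.add(s)' is Set.add, 'd[s] -= 1' on the Counter is Dict.modify with default 0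
def splstrLoop : List Char → PySem.Dict Char Int → Nat → Int → PySem.Set Char → Int
  | [], _, _, answer, _ => answer
  | s :: rest, d, nr, answer, pref =>
    let pref' := PySem.Set.add pref s
    let d' := d.modify s 0 (· - 1)
    if pref'.length = nr ∧ d'.getD s 0 ≠ 0 then
      splstrLoop rest d' nr (answer + 1) pref'
    else if d'.getD s 0 = 0 then answer
    else splstrLoop rest d' nr answer pref'

def splstr (S : String) : Int :=
  let cs := S.toList
  let d := PySem.Dict.counter cs
  let nr := d.size
  splstrLoop cs d nr 0 PySem.Set.empty

-- ===== PORT B =====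
-- one foldl over enumerate(S) carries the pair (first, last) of dicts, mirroring B's loop body;
-- '.getD 0' totalizes Python's max/min on the dicts' value lists, which are nonempty for a
-- nonempty S (every distinct character has an entry), so the default is never used
def splstr_alt (S : String) : Int :=
  let cs := S.toList
  if cs = [] then 0
  else
    let fl := (PySem.List.enumerate cs 0).foldl
      (fun (fl : PySem.Dict Char Int × PySem.Dict Char Int) p =>
        (if !fl.1.contains p.2 then fl.1.insert p.2 p.1 else fl.1, fl.2.insert p.2 p.1))
      (PySem.Dict.empty, PySem.Dict.empty)
    let mf := (PySem.List.max? fl.1.values (fun x => x)).getD 0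
    let ml := (PySem.List.min? fl.2.values (fun x => x)).getD 0
    max 0 (ml - mf)

-- ===== PRECONDITION & SPEC =====
def Spec_splstr (S : String) (out : Int) : Prop := out = splstr_alt S
instance (S : String) (out : Int) : Decidable (Spec_splstr S out) := by unfold Spec_splstr; infer_instance

-- ===== CLAIM (what is proved, stated in full; the proofs are below) =====
def Claim_equal_splstr : Prop := ∀ (S : String), Dom_splstr S → Spec_splstr S (splstr S)

-- ===== LEMMAS AND PROOFS =====

-- proof-side skeletons of the two programs:
-- ffN p r = number of loop steps until the prefix set first covers every character,
-- fsN r = first index holding a last occurrence (A's early-return step),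
-- loopAbs = A's loop with the Counter and prefix set abstracted into list membership
def ffN : List Char → List Char → Nat
  | _, [] => 0
  | p, s :: r => if r.all (fun c => decide (c ∈ p ++ [s])) then 0 else 1 + ffN (p ++ [s]) r

def fsN : List Char → Nat
  | [] => 0
  | s :: r => if s ∈ r then 1 + fsN r else 0

def loopAbs : List Char → List Char → Int
  | _, [] => 0
  | p, s :: r =>
    if s ∈ r then
      (if r.all (fun c => decide (c ∈ p ++ [s])) then 1 else 0) + loopAbs (p ++ [s]) r
    else 0

lemma ffN_zero : ∀ (r p : List Char), (∀ c ∈ r, c ∈ p) → ffN p r = 0 := by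
  intro r
  cases r with
  | nil => intro p _; rfl
  | cons s t =>
    intro p h
    have hall : t.all (fun c => decide (c ∈ p ++ [s])) = true := by
      rw [List.all_eq_true]
      intro c hc
      simp [h c (List.mem_cons_of_mem _ hc)]
    simp only [ffN, hall, if_true]

lemma loopAbs_eq : ∀ (r p : List Char), loopAbs p r = max 0 ((fsN r : Int) - (ffN p r : Int)) := by
  intro r
  induction r with
  | nil => intro p; simp [loopAbs, fsN, ffN]
  | cons s t ih =>
    intro p
    by_cases hm : s ∈ t
    · by_cases hf : t.all (fun c => decide (c ∈ p ++ [s])) = true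
      · have h0 : ffN (p ++ [s]) t = 0 := by
          apply ffN_zero
          intro c hc
          simpa using List.all_eq_true.mp hf c hc
        simp only [loopAbs, fsN, ffN, if_pos hm, if_pos hf, ih, h0]
        push_cast
        omega
      · simp only [loopAbs, fsN, ffN, if_pos hm, if_neg hf, ih]
        push_cast
        omega
    · by_cases hf : t.all (fun c => decide (c ∈ p ++ [s])) = true
      · simp only [loopAbs, fsN, ffN, if_neg hm, if_pos hf]
        omega
      · simp only [loopAbs, fsN, ffN, if_neg hm, if_neg hf]
        push_cast
        omega

lemma fs_mem : ∀ (cs : List Char), cs ≠ [] →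
    ∃ h : fsN cs < cs.length, cs[fsN cs] ∉ cs.drop (fsN cs + 1) := by
  intro cs
  induction cs with
  | nil => intro h; exact absurd rfl h
  | cons s t ih =>
    intro _
    by_cases hm : s ∈ t
    · have ht : t ≠ [] := by rintro rfl; simp at hm
      obtain ⟨h, hni⟩ := ih ht
      simp only [fsN, if_pos hm]
      refine ⟨by simp only [List.length_cons]; omega, ?_⟩
      simp only [Nat.add_comm 1 (fsN t), List.getElem_cons_succ, List.drop_succ_cons]
      exact hni
    · exact ⟨by simp [fsN, hm], by simp [fsN, hm]⟩

lemma fs_lb : ∀ (cs : List Char) (k : Nat) (h : k < cs.length),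
    cs[k] ∉ cs.drop (k + 1) → fsN cs ≤ k := by
  intro cs
  induction cs with
  | nil => intro k h; simp at h
  | cons s t ih =>
    intro k hk hni
    by_cases hm : s ∈ t
    · cases k with
      | zero => simp at hni; exact absurd hm hni
      | succ j =>
        simp only [fsN, if_pos hm]
        have := ih j (by simpa using hk) (by simpa using hni)
        omega
    · simp [fsN, hm]

lemma ff_ub : ∀ (r p : List Char) (k : Nat) (hk : k < r.length), r[k] ∉ p ++ r.take k →
    k ≤ ffN p r := by
  intro r
  induction r with
  | nil => intro p k hk; simp at hk
  | cons s t ih =>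
    intro p k hk hnk
    by_cases hf : t.all (fun c => decide (c ∈ p ++ [s])) = true
    · -- ffN = 0 : the witness can only be k = 0
      cases k with
      | zero => simp [ffN, hf]
      | succ j =>
        exfalso
        have hj : j < t.length := by simpa using hk
        have hmem : t[j] ∈ p ++ [s] := by
          simpa using List.all_eq_true.mp hf _ (List.getElem_mem hj)
        apply hnk
        simp only [List.getElem_cons_succ, List.take_succ_cons]
        simp only [List.mem_append, List.mem_cons, List.mem_singleton] at hmem ⊢
        tauto
    · simp only [ffN, if_neg hf]
      cases k with
      | zero => omega
      | succ j =>
        have hj : j < t.length := by simpa using hk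
        have hwit : t[j] ∉ (p ++ [s]) ++ t.take j := by
          intro hmem
          apply hnk
          simp only [List.getElem_cons_succ, List.take_succ_cons]
          simp only [List.mem_append, List.mem_cons, List.mem_singleton] at hmem ⊢
          tauto
        have := ih (p ++ [s]) j hj hwit
        omega

lemma ff_mem : ∀ (r p : List Char) (k : Nat) (hk : k < r.length), r[k] ∉ p ++ r.take k →
    ∃ h : ffN p r < r.length, r[ffN p r] ∉ p ++ r.take (ffN p r) := by
  intro r
  induction r with
  | nil => intro p k hk; simp at hk
  | cons s t ih =>
    intro p k hk hnk
    by_cases hf : t.all (fun c => decide (c ∈ p ++ [s])) = true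
    · -- ffN = 0 and the witness must be k = 0, so s ∉ p
      have hs : s ∉ p := by
        cases k with
        | zero => simpa using hnk
        | succ j =>
          exfalso
          have hj : j < t.length := by simpa using hk
          have hmem : t[j] ∈ p ++ [s] := by
            simpa using List.all_eq_true.mp hf _ (List.getElem_mem hj)
          apply hnk
          simp only [List.getElem_cons_succ, List.take_succ_cons]
          simp only [List.mem_append, List.mem_cons, List.mem_singleton] at hmem ⊢
          tauto
      simp only [ffN, hf, if_true]
      exact ⟨by simp, by simpa using hs⟩
    · -- some character of t is new relative to p ++ [s]: its first occurrence is a witness for ih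
      have hex : ∃ c ∈ t, c ∉ p ++ [s] := by
        by_contra hcon
        push_neg at hcon
        apply hf
        rw [List.all_eq_true]
        intro c hc
        simpa using hcon c hc
      obtain ⟨c, hc, hcp⟩ := hex
      obtain ⟨j, hjfind⟩ := Option.isSome_iff_exists.mp ((PySem.List.index?_isSome_iff t c).mpr hc)
      obtain ⟨hj, hjc, hjfirst⟩ := PySem.List.getElem_of_index?_eq_some hjfind
      have hwit : t[j] ∉ (p ++ [s]) ++ t.take j := by
        rw [hjc]
        intro hmem
        rcases List.mem_append.mp hmem with h1 | h1
        · exact hcp h1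
        · obtain ⟨i, hi, hit⟩ := List.mem_take_iff_getElem.mp h1
          exact hjfirst i (by omega) (by rw [hit])
      obtain ⟨h, hni⟩ := ih (p ++ [s]) j hj hwit
      simp only [ffN, if_neg hf]
      refine ⟨by simp only [List.length_cons]; omega, ?_⟩
      simp only [Nat.add_comm 1 (ffN (p ++ [s]) t), List.getElem_cons_succ, List.take_succ_cons]
      intro hmem
      apply hni
      simp only [List.mem_append, List.mem_cons, List.mem_singleton] at hmem ⊢
      tauto

lemma setcard_iff (q r : List Char) :
    (PySem.Set.ofList (q ++ r)).length = (PySem.Set.ofList q).length ↔ ∀ c ∈ r, c ∈ q := by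
  rw [PySem.Set.ofList_append, PySem.Set.update_eq_append_filter, List.length_append]
  constructor
  · intro h c hc
    have hnil : ((PySem.Set.ofList r).filter
        (fun y => !(PySem.Set.contains (PySem.Set.ofList q) y))) = [] := by
      apply List.eq_nil_of_length_eq_zero
      omega
    by_contra hcq
    have hcmem : c ∈ (PySem.Set.ofList r).filter
        (fun y => !(PySem.Set.contains (PySem.Set.ofList q) y)) := by
      rw [List.mem_filter]
      constructor
      · exact (PySem.Set.mem_ofList _ _).mpr hc
      · simp only [Bool.not_eq_eq_eq_not, Bool.not_true]
        rw [← Bool.not_eq_true]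
        intro hcontains
        exact hcq ((PySem.Set.mem_ofList _ _).mp ((PySem.Set.contains_iff _ _).mp hcontains))
    rw [hnil] at hcmem
    simp at hcmem
  · intro h
    have hnil : ((PySem.Set.ofList r).filter
        (fun y => !(PySem.Set.contains (PySem.Set.ofList q) y))) = [] := by
      rw [List.filter_eq_nil_iff]
      intro a ha
      have haq : a ∈ q := h a ((PySem.Set.mem_ofList _ _).mp ha)
      simp [haq]
    rw [hnil]
    simp

-- B's paired fold, split into its two component dict folds
def firstFold (cs : List Char) : PySem.Dict Char Int :=
  (PySem.List.enumerate cs 0).foldl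
    (fun d p => if !d.contains p.2 then d.insert p.2 p.1 else d) PySem.Dict.empty

def lastFold (cs : List Char) : PySem.Dict Char Int :=
  (PySem.List.enumerate cs 0).foldl (fun d p => d.insert p.2 p.1) PySem.Dict.empty

lemma alt_folds (S : String) :
    splstr_alt S =
      (if S.toList = [] then 0
       else max 0 (((PySem.List.min? (lastFold S.toList).values (fun x => x)).getD 0)
         - ((PySem.List.max? (firstFold S.toList).values (fun x => x)).getD 0))) := by
  have h2 : (PySem.List.enumerate S.toList 0).foldl
      (fun (fl : PySem.Dict Char Int × PySem.Dict Char Int) p =>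
        (if !fl.1.contains p.2 then fl.1.insert p.2 p.1 else fl.1, fl.2.insert p.2 p.1))
      (PySem.Dict.empty, PySem.Dict.empty) = (firstFold S.toList, lastFold S.toList) :=
    PySem.List.foldl_prod_mk
      (fun (d : PySem.Dict Char Int) (p : Int × Char) =>
        if !d.contains p.2 then d.insert p.2 p.1 else d)
      (fun (d : PySem.Dict Char Int) (p : Int × Char) => d.insert p.2 p.1)
      (PySem.List.enumerate S.toList 0) PySem.Dict.empty PySem.Dict.empty
  simp only [splstr_alt]
  rw [h2]

lemma lastFold_append (cs : List Char) (c : Char) :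
    lastFold (cs ++ [c]) = (lastFold cs).insert c (cs.length : Int) := by
  unfold lastFold
  rw [PySem.List.enumerate_append, List.foldl_append]
  simp [PySem.List.enumerate_cons, PySem.List.enumerate_nil]

lemma firstFold_append (cs : List Char) (c : Char) :
    firstFold (cs ++ [c]) =
      (if !((firstFold cs).contains c) then (firstFold cs).insert c (cs.length : Int)
       else firstFold cs) := by
  unfold firstFold
  rw [PySem.List.enumerate_append, List.foldl_append]
  simp [PySem.List.enumerate_cons, PySem.List.enumerate_nil]

lemma lastFold_keys (cs : List Char) : (lastFold cs).keys = PySem.Set.ofList cs := by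
  unfold lastFold
  have h := PySem.Dict.keys_foldl_insert_key (ν := Int) (PySem.List.enumerate cs 0)
    (·.2) (fun _ p => p.1) PySem.Dict.empty
  simp only [PySem.Dict.keys_empty, PySem.List.map_snd_enumerate] at h
  rw [h]
  exact PySem.Set.update_nil_left cs

lemma last_getD : ∀ (cs : List Char) (k : Nat) (hk : k < cs.length),
    cs[k] ∉ cs.drop (k + 1) → (lastFold cs).getD cs[k] 0 = (k : Int) := by
  intro cs
  induction cs using List.reverseRecOn with
  | nil => intro k hk; simp at hk
  | append_singleton cs c ih =>
    intro k hk hpred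
    rw [lastFold_append, PySem.Dict.getD_insert]
    by_cases hkl : k < cs.length
    · have hg : (cs ++ [c])[k] = cs[k] := List.getElem_append_left hkl
      have hdrop : (cs ++ [c]).drop (k + 1) = cs.drop (k + 1) ++ [c] :=
        List.drop_append_of_le_length (by omega)
      rw [hg]
      rw [hg, hdrop] at hpred
      have hne : cs[k] ≠ c := by intro h; exact hpred (by simp [h])
      rw [if_neg hne]
      exact ih k hkl (fun h => hpred (by simp [h]))
    · have hkeq : k = cs.length := by simp at hk; omega
      subst hkeq
      have hg : (cs ++ [c])[cs.length]'(by simp) = c := by simp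
      rw [hg, if_pos rfl]

lemma last_getD_pred : ∀ (cs : List Char) (c : Char), c ∈ cs →
    ∃ k, ∃ h : k < cs.length, (lastFold cs).getD c 0 = (k : Int) ∧ cs[k] = c ∧
      cs[k] ∉ cs.drop (k + 1) := by
  intro cs
  induction cs using List.reverseRecOn with
  | nil => intro c hc; simp at hc
  | append_singleton cs c0 ih =>
    intro c hc
    rw [lastFold_append, PySem.Dict.getD_insert]
    by_cases hcc : c = c0
    · subst hcc
      refine ⟨cs.length, by simp, by rw [if_pos rfl], by simp, by simp⟩
    · have hcs : c ∈ cs := by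
        rcases List.mem_append.mp hc with h | h
        · exact h
        · simp at h; exact absurd h hcc
      obtain ⟨k, hk, hgd, hck, hpred⟩ := ih c hcs
      refine ⟨k, by simp; omega, ?_, ?_, ?_⟩
      · rw [if_neg hcc]; exact hgd
      · rw [List.getElem_append_left hk]; exact hck
      · rw [List.getElem_append_left hk,
          List.drop_append_of_le_length (by omega)]
        intro hmem
        rcases List.mem_append.mp hmem with h | h
        · exact hpred h
        · simp at h; rw [hck] at h; exact hcc h

lemma mem_last_values (cs : List Char) (x : Int) :
    x ∈ (lastFold cs).values ↔
      ∃ k, ∃ h : k < cs.length, x = (k : Int) ∧ cs[k] ∉ cs.drop (k + 1) := by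
  have hnd : (lastFold cs).keys.Nodup := by
    rw [lastFold_keys]; exact PySem.Set.nodup_ofList cs
  rw [PySem.Dict.values_eq_map_keys _ hnd 0, List.mem_map]
  constructor
  · rintro ⟨c, hck, rfl⟩
    have hcs : c ∈ cs := (PySem.Set.mem_ofList _ _).mp (lastFold_keys cs ▸ hck)
    obtain ⟨k, hk, hgd, hckk, hpred⟩ := last_getD_pred cs c hcs
    exact ⟨k, hk, hgd, hpred⟩
  · rintro ⟨k, hk, rfl, hpred⟩
    refine ⟨cs[k], ?_, ?_⟩
    · rw [lastFold_keys]
      exact (PySem.Set.mem_ofList _ _).mpr (List.getElem_mem hk)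
    · exact last_getD cs k hk hpred

lemma first_inv : ∀ (cs : List Char), (firstFold cs).keys = PySem.Set.ofList cs ∧
    ∀ x : Int, (x ∈ (firstFold cs).values ↔
      ∃ k, ∃ h : k < cs.length, x = (k : Int) ∧ cs[k] ∉ cs.take k) := by
  intro cs
  induction cs using List.reverseRecOn with
  | nil =>
    constructor
    · rfl
    · intro x
      constructor
      · intro hx
        rw [show (firstFold []).values = [] from rfl] at hx
        cases hx
      · rintro ⟨k, hk, -⟩; simp at hk
  | append_singleton cs c0 ih =>
    obtain ⟨ihk, ihv⟩ := ih
    rw [firstFold_append]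
    by_cases hc : c0 ∈ cs
    · have hcont : (firstFold cs).contains c0 = true :=
        (PySem.Dict.contains_iff_mem_keys _ _).mpr
          (ihk ▸ (PySem.Set.mem_ofList _ _).mpr hc)
      rw [hcont]
      simp only [Bool.not_true, Bool.false_eq_true, if_false]
      constructor
      · rw [ihk, PySem.Set.ofList_append_singleton,
          PySem.Set.add_of_mem ((PySem.Set.mem_ofList _ _).mpr hc)]
      · intro x
        rw [ihv x]
        constructor
        · rintro ⟨k, hk, rfl, hpred⟩
          refine ⟨k, by simp; omega, rfl, ?_⟩
          rw [List.getElem_append_left hk, List.take_append_of_le_length (by omega)]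
          exact hpred
        · rintro ⟨k, hk, rfl, hpred⟩
          by_cases hkl : k < cs.length
          · refine ⟨k, hkl, rfl, ?_⟩
            rw [List.getElem_append_left hkl,
              List.take_append_of_le_length (by omega)] at hpred
            exact hpred
          · exfalso
            have hkeq : k = cs.length := by simp at hk; omega
            subst hkeq
            apply hpred
            have hg : (cs ++ [c0])[cs.length]'(by simp) = c0 := by simp
            rw [hg, List.take_append_of_le_length (by omega), List.take_length]
            exact hc
    · have hcont : (firstFold cs).contains c0 = false := by
        rw [← Bool.not_eq_true, PySem.Dict.contains_iff_mem_keys, ihk]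
        intro hmem
        exact hc ((PySem.Set.mem_ofList _ _).mp hmem)
      rw [hcont]
      simp only [Bool.not_false, if_true]
      constructor
      · rw [PySem.Dict.keys_insert_of_not_contains _ _ hcont, ihk,
          PySem.Set.ofList_append_singleton,
          PySem.Set.add_of_not_mem (fun h => hc ((PySem.Set.mem_ofList _ _).mp h))]
      · intro x
        have hval : ((firstFold cs).insert c0 (cs.length : Int)).values
            = (firstFold cs).values ++ [(cs.length : Int)] := by
          simp [PySem.Dict.values, PySem.Dict.items_insert_of_not_contains _ _ hcont]
        rw [hval, List.mem_append]
        constructor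
        · rintro (hx | hx)
          · obtain ⟨k, hk, rfl, hpred⟩ := (ihv x).mp hx
            refine ⟨k, by simp; omega, rfl, ?_⟩
            rw [List.getElem_append_left hk, List.take_append_of_le_length (by omega)]
            exact hpred
          · simp only [List.mem_singleton] at hx
            refine ⟨cs.length, by simp, hx, ?_⟩
            have hg : (cs ++ [c0])[cs.length]'(by simp) = c0 := by simp
            rw [hg, List.take_append_of_le_length (by omega), List.take_length]
            exact hc
        · rintro ⟨k, hk, rfl, hpred⟩
          by_cases hkl : k < cs.length
          · left
            apply (ihv _).mpr
            refine ⟨k, hkl, rfl, ?_⟩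
            rw [List.getElem_append_left hkl,
              List.take_append_of_le_length (by omega)] at hpred
            exact hpred
          · right
            have hkeq : k = cs.length := by simp at hk; omega
            subst hkeq
            simp

lemma splstr_alt_eq (S : String) :
    splstr_alt S = max 0 ((fsN S.toList : Int) - (ffN [] S.toList : Int)) := by
  rw [alt_folds]
  by_cases hcs : S.toList = []
  · simp [hcs, fsN, ffN]
  · have hne : S.toList ≠ [] := hcs
    have h0 : 0 < S.toList.length := List.length_pos_of_ne_nil hne
    have hml : PySem.List.min? (lastFold S.toList).values (fun x => x)
        = some ((fsN S.toList : Int)) := by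
      obtain ⟨hlt, hni⟩ := fs_mem S.toList hne
      have hmem := (mem_last_values S.toList ((fsN S.toList : Int))).mpr
        ⟨fsN S.toList, hlt, rfl, hni⟩
      cases hmin : PySem.List.min? (lastFold S.toList).values (fun x => x) with
      | none =>
        rw [PySem.List.min?_eq_none_iff] at hmin
        rw [hmin] at hmem
        simp at hmem
      | some m =>
        have hm_mem := PySem.List.min?_mem hmin
        have hle : m ≤ (fsN S.toList : Int) := PySem.List.min?_isMin hmin _ hmem
        have hge : (fsN S.toList : Int) ≤ m := by
          obtain ⟨k, hk, rfl, hknl⟩ := (mem_last_values S.toList m).mp hm_mem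
          exact_mod_cast fs_lb S.toList k hk hknl
        rw [le_antisymm hle hge]
    have hmf : PySem.List.max? (firstFold S.toList).values (fun x => x)
        = some ((ffN [] S.toList : Int)) := by
      have hwit0 : S.toList[0] ∉ ([] : List Char) ++ S.toList.take 0 := by simp
      obtain ⟨hlt, hni⟩ := ff_mem S.toList [] 0 h0 hwit0
      have hmem := ((first_inv S.toList).2 ((ffN [] S.toList : Int))).mpr
        ⟨ffN [] S.toList, hlt, rfl, by simpa using hni⟩
      cases hmax : PySem.List.max? (firstFold S.toList).values (fun x => x) with
      | none =>
        rw [PySem.List.max?_eq_none_iff] at hmax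
        rw [hmax] at hmem
        simp at hmem
      | some m =>
        have hm_mem := PySem.List.max?_mem hmax
        have hge : m ≤ (ffN [] S.toList : Int) := by
          obtain ⟨k, hk, rfl, hknl⟩ := ((first_inv S.toList).2 m).mp hm_mem
          exact_mod_cast ff_ub S.toList [] k hk (by simpa using hknl)
        have hle : (ffN [] S.toList : Int) ≤ m := PySem.List.max?_isMax hmax _ hmem
        rw [le_antisymm hge hle]
    rw [if_neg hcs, hml, hmf]
    simp

lemma loopA : ∀ (r p : List Char) (d : PySem.Dict Char Int) (ans : Int),
    (∀ c, d.getD c 0 = (r.count c : Int)) →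
    splstrLoop r d (PySem.Set.ofList (p ++ r)).length ans (PySem.Set.ofList p) = ans + loopAbs p r := by
  intro r
  induction r with
  | nil => intro p d ans hd; simp [splstrLoop, loopAbs]
  | cons s t ih =>
    intro p d ans hd
    have hassoc : p ++ s :: t = (p ++ [s]) ++ t := by simp
    have hpref : PySem.Set.add (PySem.Set.ofList p) s = PySem.Set.ofList (p ++ [s]) :=
      (PySem.Set.ofList_append_singleton p s).symm
    have hds : (d.modify s 0 (· - 1)).getD s 0 = (t.count s : Int) := by
      rw [PySem.Dict.getD_modify_self, hd s]
      push_cast [List.count_cons_self]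
      ring
    have hd' : ∀ c, (d.modify s 0 (· - 1)).getD c 0 = (t.count c : Int) := by
      intro c
      by_cases hcs : c = s
      · subst hcs; exact hds
      · rw [PySem.Dict.getD_modify_of_ne d 0 (· - 1) hcs, hd c]
        congr 1
        simp [List.count_cons, Ne.symm hcs]
    have hfull_iff : ((PySem.Set.add (PySem.Set.ofList p) s).length
          = (PySem.Set.ofList (p ++ s :: t)).length)
        ↔ (t.all (fun c => decide (c ∈ p ++ [s])) = true) := by
      rw [hpref, hassoc, eq_comm, setcard_iff (p ++ [s]) t, List.all_eq_true]
      constructor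
      · intro h c hc; simpa using h c hc
      · intro h c hc; simpa using h c hc
    have hmem_iff : ((t.count s : Int) ≠ 0) ↔ s ∈ t := by
      constructor
      · intro h
        exact List.count_pos_iff.mp (Nat.pos_of_ne_zero (by exact_mod_cast h))
      · intro h
        have hp := List.count_pos_iff.mpr h
        exact_mod_cast Nat.pos_iff_ne_zero.mp hp
    have hc2 : ((d.modify s 0 (· - 1)).getD s 0 ≠ 0) ↔ s ∈ t := by rw [hds]; exact hmem_iff
    rw [show splstrLoop (s :: t) d (PySem.Set.ofList (p ++ s :: t)).length ans (PySem.Set.ofList p) =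
      (if (PySem.Set.add (PySem.Set.ofList p) s).length = (PySem.Set.ofList (p ++ s :: t)).length ∧
          (d.modify s 0 (· - 1)).getD s 0 ≠ 0 then
        splstrLoop t (d.modify s 0 (· - 1)) (PySem.Set.ofList (p ++ s :: t)).length (ans + 1)
          (PySem.Set.add (PySem.Set.ofList p) s)
      else if (d.modify s 0 (· - 1)).getD s 0 = 0 then ans
      else splstrLoop t (d.modify s 0 (· - 1)) (PySem.Set.ofList (p ++ s :: t)).length ans
          (PySem.Set.add (PySem.Set.ofList p) s)) from rfl]
    rw [show loopAbs p (s :: t) =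
      (if s ∈ t then (if t.all (fun c => decide (c ∈ p ++ [s])) then 1 else 0) + loopAbs (p ++ [s]) t
       else 0) from rfl]
    by_cases hf : t.all (fun c => decide (c ∈ p ++ [s])) = true
    · by_cases hm : s ∈ t
      · rw [if_pos ⟨hfull_iff.mpr hf, hc2.mpr hm⟩, hpref, hassoc, ih (p ++ [s]) _ _ hd',
          if_pos hm, if_pos hf]
        ring
      · rw [if_neg (by rintro ⟨-, h2⟩; exact h2 (by rw [hds]; exact_mod_cast List.count_eq_zero.mpr hm)),
          if_pos (by rw [hds]; exact_mod_cast List.count_eq_zero.mpr hm), if_neg hm]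
        ring
    · by_cases hm : s ∈ t
      · rw [if_neg (by rintro ⟨h1, -⟩; exact hf (hfull_iff.mp h1)),
          if_neg (hc2.mpr hm), hpref, hassoc, ih (p ++ [s]) _ _ hd', if_pos hm, if_neg hf]
        ring
      · rw [if_neg (by rintro ⟨h1, -⟩; exact hf (hfull_iff.mp h1)),
          if_pos (by rw [hds]; exact_mod_cast List.count_eq_zero.mpr hm), if_neg hm]
        ring

lemma splstr_eq (S : String) : splstr S = loopAbs [] S.toList := by
  have hd : ∀ c : Char, (PySem.Dict.counter S.toList).getD c 0 = (S.toList.count c : Int) :=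
    fun c => PySem.Dict.getD_counter ..
  have hsize : (PySem.Dict.counter S.toList : PySem.Dict Char Int).size
      = (PySem.Set.ofList S.toList).length := by
    have hk := PySem.Dict.keys_counter (xs := S.toList)
    have hlen : (PySem.Dict.counter S.toList : PySem.Dict Char Int).keys.length
        = (PySem.Set.ofList S.toList).length := by rw [hk]
    simpa [PySem.Dict.keys, PySem.Dict.size] using hlen
  show splstrLoop S.toList (PySem.Dict.counter S.toList)
    (PySem.Dict.counter S.toList : PySem.Dict Char Int).size 0 PySem.Set.empty = loopAbs [] S.toList
  rw [hsize]
  have h := loopA S.toList [] (PySem.Dict.counter S.toList) 0 hd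
  simpa using h

-- ===== VERDICT (by name: the statement is the Claim_ definition above) =====
theorem splstr_spec : Claim_equal_splstr := by
  intro S _
  unfold Spec_splstr
  rw [splstr_eq, loopAbs_eq, splstr_alt_eq]
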